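-- pv_equiv track=rewrite | github.com/witnesslq/transwarp-nlp | transwarpnlp/dataprocess/joint_data_transform.py | decode_tags
-- ===== SOURCE A (Python) =====
-- def decode_tags(idx, index2tags, tag_scheme):
--     out = []
--     dic = index2tags[tag_scheme]
--     for id in idx:
--         sents = []
--         for line in id:
--             sent = []
--             for item in line:
--                 tag = dic[item]
--                 if '-' in tag:
--                     tag = tag.replace('E-', 'I-')
--                     tag = tag.replace('S-', 'B-')
--                 else:
--                     tag = tag.replace('E', 'I')
--                     tag = tag.replace('S', 'B')
--                 sent.append(tag)
--             sents.append(sent)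
--         out.append(sents)
--     return out
-- ===== SOURCE B (Python) =====
-- def decode_tags(idx, index2tags, tag_scheme):
--     dic = index2tags[tag_scheme]
--     norm = {}
--     for item, tag in dic.items():
--         if '-' in tag:
--             norm[item] = tag.replace('E-', 'I-').replace('S-', 'B-')
--         else:
--             norm[item] = tag.replace('E', 'I').replace('S', 'B')
--     return [[[norm[item] for item in line] for line in id] for id in idx]
-- ===== Notes on version B (the rewrite author's own statement) =====
-- stated objective: simpler
-- what changed: B normalizes each tag once into a precomputed table over the active dict's items, then produces the output with pure lookups in nested comprehensions instead of re-running the '-'-branch and replace calls on every occurrence.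
import Mathlib
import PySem

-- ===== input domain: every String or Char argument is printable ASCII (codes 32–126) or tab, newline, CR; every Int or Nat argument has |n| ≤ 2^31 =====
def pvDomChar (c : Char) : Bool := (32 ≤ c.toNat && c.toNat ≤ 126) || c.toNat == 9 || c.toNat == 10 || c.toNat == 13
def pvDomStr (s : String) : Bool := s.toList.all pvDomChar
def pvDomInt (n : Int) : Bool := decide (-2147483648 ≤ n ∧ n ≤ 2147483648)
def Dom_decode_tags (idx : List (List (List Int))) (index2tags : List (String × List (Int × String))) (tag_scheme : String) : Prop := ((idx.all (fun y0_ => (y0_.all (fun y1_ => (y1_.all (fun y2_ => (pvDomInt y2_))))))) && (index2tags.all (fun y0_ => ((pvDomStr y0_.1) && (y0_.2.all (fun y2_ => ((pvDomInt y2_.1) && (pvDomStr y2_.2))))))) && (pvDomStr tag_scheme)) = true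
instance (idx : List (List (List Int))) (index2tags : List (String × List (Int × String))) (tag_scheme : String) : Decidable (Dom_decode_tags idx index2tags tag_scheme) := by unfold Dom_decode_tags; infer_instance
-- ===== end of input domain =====

-- B hoists the per-tag normalization into a table built once from the active dict,
-- then fills the output with pure lookups (objective: simpler).  Equivalence is
-- about the return value only; neither program mutates its arguments.

-- dict indexing d[k] as first-match lookup on the association list; the default is
-- only reached outside Pre_decode_tags (where Python raises KeyError)
def pvGetD {α β : Type} [BEq α] (l : List (α × β)) (k : α) (d : β) : β :=
  match l with
  | [] => d
  | (k', v) :: r => if k' == k then v else pvGetD r k d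

-- ===== PORT A =====
def decode_tags (idx : List (List (List Int))) (index2tags : List (String × List (Int × String))) (tag_scheme : String) : List (List (List String)) :=
  let dic := pvGetD index2tags tag_scheme []
  idx.foldl (fun out id =>
    out ++ [id.foldl (fun sents line =>
      sents ++ [line.foldl (fun sent item =>
        let tag := pvGetD dic item ""
        let tag := if PySem.Str.isIn "-" tag then
            PySem.Str.replace (PySem.Str.replace tag "E-" "I-") "S-" "B-"
          else
            PySem.Str.replace (PySem.Str.replace tag "E" "I") "S" "B"
        sent ++ [tag]) []]) []]) []

-- ===== PORT B =====
-- the normalization applied once per table entry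
def pvNormTag (tag : String) : String :=
  if PySem.Str.isIn "-" tag then
    PySem.Str.replace (PySem.Str.replace tag "E-" "I-") "S-" "B-"
  else
    PySem.Str.replace (PySem.Str.replace tag "E" "I") "S" "B"

-- Source B builds `norm` by one pass over dic.items() (a dict's keys are distinct),
-- so the table is the item list with each value normalized in place
def decode_tags_alt (idx : List (List (List Int))) (index2tags : List (String × List (Int × String))) (tag_scheme : String) : List (List (List String)) :=
  let dic := pvGetD index2tags tag_scheme []
  let norm := dic.map (fun p => (p.1, pvNormTag p.2))
  idx.map (fun id => id.map (fun line => line.map (fun item => pvGetD norm item "")))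

-- ===== PRECONDITION & SPEC =====
-- Pre_ excludes exactly the inputs where Python A raises KeyError: tag_scheme must be
-- a key of index2tags and every index must be a key of the selected tag dict.
def Pre_decode_tags (idx : List (List (List Int))) (index2tags : List (String × List (Int × String))) (tag_scheme : String) : Prop :=
  ((index2tags.any (fun p => p.1 == tag_scheme)) &&
   idx.all (fun id => id.all (fun line => line.all (fun item =>
     (pvGetD index2tags tag_scheme []).any (fun p => p.1 == item))))) = true
instance (idx : List (List (List Int))) (index2tags : List (String × List (Int × String))) (tag_scheme : String) : Decidable (Pre_decode_tags idx index2tags tag_scheme) := by unfold Pre_decode_tags; infer_instance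

def pvWitness_decode_tags : List (List (List Int)) × (List (String × List (Int × String))) × String :=
  ([[[0, 1], [2]]], [("tags", [(0, "S-PER"), (1, "E-PER"), (2, "O")])], "tags")

def Spec_decode_tags (idx : List (List (List Int))) (index2tags : List (String × List (Int × String))) (tag_scheme : String) (out : List (List (List String))) : Prop := out = decode_tags_alt idx index2tags tag_scheme
instance (idx : List (List (List Int))) (index2tags : List (String × List (Int × String))) (tag_scheme : String) (out : List (List (List String))) : Decidable (Spec_decode_tags idx index2tags tag_scheme out) := by unfold Spec_decode_tags; infer_instance

-- ===== CLAIM (what is proved, stated in full; the proofs are below) =====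
def Claim_equal_decode_tags : Prop := ∀ (idx : List (List (List Int))) (index2tags : List (String × List (Int × String))) (tag_scheme : String), Dom_decode_tags idx index2tags tag_scheme → Pre_decode_tags idx index2tags tag_scheme → Spec_decode_tags idx index2tags tag_scheme (decode_tags idx index2tags tag_scheme)

-- ===== LEMMAS AND PROOFS =====

-- append-accumulator loop = map
theorem pvFoldlAppendMap {α β : Type} (f : α → β) (xs : List α) (acc : List β) :
    xs.foldl (fun out x => out ++ [f x]) acc = acc ++ xs.map f := by
  induction xs generalizing acc with
  | nil => simp
  | cons x r ih => simp [List.foldl, ih]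

-- lookup in the mapped table = map after lookup, for keys present in the table
theorem pvGetD_map (dic : List (Int × String)) (k : Int)
    (h : dic.any (fun p => p.1 == k) = true) :
    pvGetD (dic.map (fun p => (p.1, pvNormTag p.2))) k "" = pvNormTag (pvGetD dic k "") := by
  induction dic with
  | nil => simp at h
  | cons p r ih =>
    by_cases hk : p.1 == k
    · simp [pvGetD, hk]
    · have h' : (r.any fun p => p.1 == k) = true := by
        simp only [List.any_cons, hk, Bool.false_or] at h; exact h
      simp [pvGetD, hk, ih h']

theorem decode_tags_spec : Claim_equal_decode_tags := by
  intro idx index2tags tag_scheme _ hpre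
  unfold Spec_decode_tags decode_tags decode_tags_alt
  simp only [Pre_decode_tags, Bool.and_eq_true, List.all_eq_true] at hpre
  obtain ⟨-, hall⟩ := hpre
  rw [pvFoldlAppendMap (acc := [])]
  simp only [List.nil_append]
  apply List.map_congr_left
  intro id hid
  rw [pvFoldlAppendMap (acc := [])]
  simp only [List.nil_append]
  apply List.map_congr_left
  intro line hline
  rw [pvFoldlAppendMap (acc := [])]
  simp only [List.nil_append]
  apply List.map_congr_left
  intro item hitem
  have h := hall id hid line hline item hitem
  rw [pvGetD_map _ _ h]
  rfl
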